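-- pv_equiv track=rewrite | github.com/lelilia/advent_of_code_2023 | day10.py | check_counts
-- ===== SOURCE A (Python) =====
-- def check_counts(pipes, unique, counts):
--     lookup = dict(zip(unique, counts))
--     count = 0
--     for pipe in pipes:
--         if (c := lookup.get(pipe)):
--             count += c
--     if count % 2 == 1:
--         return True
--     return False
-- ===== SOURCE B (Python) =====
-- def check_counts(pipes, unique, counts):
--     occ = {}
--     for p in pipes:
--         occ[p] = occ.get(p, 0) + 1
--     total = 0
--     for pipe, c in dict(zip(unique, counts)).items():
--         total += c * occ.get(pipe, 0)
--     return total % 2 == 1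
-- ===== Notes on version B (the rewrite author's own statement) =====
-- stated objective: alternative
-- what changed: B inverts the traversal: it first tallies pipe occurrences into a hand-built counter dict, then iterates over the lookup table's entries adding value * occurrences for each, and tests parity of the total, instead of A's single scan over pipes with a dict lookup and truthiness guard per element.
import Mathlib
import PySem

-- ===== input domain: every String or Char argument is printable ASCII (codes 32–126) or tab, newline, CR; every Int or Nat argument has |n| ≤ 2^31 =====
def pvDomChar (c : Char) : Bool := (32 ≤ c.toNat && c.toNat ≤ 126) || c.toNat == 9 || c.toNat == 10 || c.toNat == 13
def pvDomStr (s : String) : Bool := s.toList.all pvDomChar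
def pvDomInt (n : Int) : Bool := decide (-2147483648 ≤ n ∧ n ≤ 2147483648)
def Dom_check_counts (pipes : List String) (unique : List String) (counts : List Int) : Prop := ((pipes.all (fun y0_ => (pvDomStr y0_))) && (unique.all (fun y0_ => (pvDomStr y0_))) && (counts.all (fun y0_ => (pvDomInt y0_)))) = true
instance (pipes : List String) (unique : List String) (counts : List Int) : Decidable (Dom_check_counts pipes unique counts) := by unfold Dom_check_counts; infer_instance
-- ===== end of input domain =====

-- B tallies pipe occurrences into a counter dict and then iterates over the lookup table's
-- entries adding value * occurrences, instead of A's per-pipe lookup with a truthiness guard;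
-- same result, inverted traversal (alternative).


-- ===== PORT A =====
def check_counts (pipes : List String) (unique : List String) (counts : List Int) : Bool :=
  let lookup := PySem.Dict.ofList (unique.zip counts)
  let count : Int := pipes.foldl (fun count pipe =>
    match lookup.get? pipe with      -- if (c := lookup.get(pipe)): truthy iff some nonzero c
    | some c => if c ≠ 0 then count + c else count
    | none => count) 0
  if PySem.Int.mod count 2 == 1 then true else false

-- ===== PORT B =====
def check_counts_alt (pipes : List String) (unique : List String) (counts : List Int) : Bool :=
  let occ : PySem.Dict String Int :=
    pipes.foldl (fun occ p => occ.insert p (occ.getD p 0 + 1)) PySem.Dict.empty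
  let total : Int := (PySem.Dict.ofList (unique.zip counts)).items.foldl
    (fun total kv => total + kv.2 * occ.getD kv.1 0) 0
  PySem.Int.mod total 2 == 1

-- ===== PRECONDITION & SPEC =====
def Spec_check_counts (pipes : List String) (unique : List String) (counts : List Int) (out : Bool) : Prop := out = check_counts_alt pipes unique counts
instance (pipes : List String) (unique : List String) (counts : List Int) (out : Bool) : Decidable (Spec_check_counts pipes unique counts out) := by unfold Spec_check_counts; infer_instance

-- ===== CLAIM (what is proved, stated in full; the proofs are below) =====
def Claim_equal_check_counts : Prop := ∀ (pipes : List String) (unique : List String) (counts : List Int), Dom_check_counts pipes unique counts → Spec_check_counts pipes unique counts (check_counts pipes unique counts)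

-- ===== LEMMAS AND PROOFS =====

-- A's loop step adds exactly `getD pipe 0` (the truthiness guard skips only c = 0, a no-op add).
theorem step_getD (d : PySem.Dict String Int) (acc : Int) (p : String) :
    (match d.get? p with
     | some c => if c ≠ 0 then acc + c else acc
     | none => acc) = acc + d.getD p 0 := by
  rw [PySem.Dict.getD_eq_get?_getD]
  rcases h : d.get? p with _ | c
  · simp
  · by_cases hc : c = 0 <;> simp [hc]

-- cons step for Python's list.count
theorem count_cons_eq (p k : String) (ps : List String) :
    PySem.List.count (p :: ps) k = PySem.List.count ps k + (if (p == k) = true then 1 else 0) := by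
  simp [PySem.List.count, List.count_cons]

-- Σ_{p ∈ pipes} (if p = k then v else 0) = v * pipes.count k
theorem sum_ite_count (pipes : List String) (k : String) (v : Int) :
    (pipes.map (fun p => if (k == p) = true then v else 0)).sum
      = v * (PySem.List.count pipes k : Int) := by
  induction pipes with
  | nil => simp [PySem.List.count]
  | cons p ps ih =>
      rw [List.map_cons, List.sum_cons, ih, count_cons_eq]
      by_cases hk : p = k
      · have h1 : (k == p) = true := by simp [hk]
        have h2 : (p == k) = true := by simp [hk]
        rw [if_pos h1, if_pos h2]
        push_cast
        ring
      · have h1 : ¬ (k == p) = true := by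
          simp only [beq_iff_eq]; exact fun hh => hk hh.symm
        have h2 : ¬ (p == k) = true := by simpa using hk
        rw [if_neg h1, if_neg h2]
        push_cast
        ring

-- A key absent from the items has getD = 0.
theorem getD_zero_of_not_mem (l : List (String × Int)) (k : String)
    (h : k ∉ l.map Prod.fst) : (PySem.Dict.mk l).getD k 0 = 0 := by
  induction l with
  | nil => simp [PySem.Dict.getD_eq_get?_getD, PySem.Dict.get?]
  | cons kv rest ih =>
      obtain ⟨k', v⟩ := kv
      simp only [List.map_cons, List.mem_cons, not_or] at h
      rw [PySem.Dict.getD_eq_get?_getD, PySem.Dict.get?_mk_cons]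
      have : ¬ (k' == k) = true := by
        simp only [beq_iff_eq]; exact fun hh => h.1 hh.symm
      rw [if_neg this, ← PySem.Dict.getD_eq_get?_getD]
      exact ih h.2

-- Core exchange: summing lookups over pipes = summing value*occurrences over the (nodup-key) table.
theorem exchange (pipes : List String) (l : List (String × Int))
    (h : (l.map Prod.fst).Nodup) :
    (pipes.map (fun p => (PySem.Dict.mk l).getD p 0)).sum
      = (l.map (fun kv => kv.2 * (PySem.List.count pipes kv.1 : Int))).sum := by
  induction l with
  | nil => simp [PySem.Dict.getD_eq_get?_getD, PySem.Dict.get?]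
  | cons kv rest ih =>
      obtain ⟨k, v⟩ := kv
      simp only [List.map_cons, List.nodup_cons] at h
      have hrest : (fun p => (PySem.Dict.mk ((k, v) :: rest)).getD p 0)
          = fun p => (if (k == p) = true then v else 0) + (PySem.Dict.mk rest).getD p 0 := by
        funext p
        rw [PySem.Dict.getD_eq_get?_getD, PySem.Dict.get?_mk_cons]
        by_cases hk : (k == p) = true
        · have hkp : k = p := by simpa using hk
          subst hkp
          rw [if_pos hk, if_pos hk, Option.getD_some, getD_zero_of_not_mem rest k h.1, add_zero]
        · rw [if_neg hk, if_neg hk, ← PySem.Dict.getD_eq_get?_getD, zero_add]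
      calc (pipes.map (fun p => (PySem.Dict.mk ((k, v) :: rest)).getD p 0)).sum
          = (pipes.map (fun p => (if (k == p) = true then v else 0)
              + (PySem.Dict.mk rest).getD p 0)).sum := by rw [hrest]
        _ = (pipes.map (fun p => if (k == p) = true then v else 0)).sum
              + (pipes.map (fun p => (PySem.Dict.mk rest).getD p 0)).sum := List.sum_map_add
        _ = v * (PySem.List.count pipes k : Int)
              + (rest.map (fun kv => kv.2 * (PySem.List.count pipes kv.1 : Int))).sum := by
            rw [sum_ite_count, ih h.2]
        _ = (((k, v) :: rest).map (fun kv => kv.2 * (PySem.List.count pipes kv.1 : Int))).sum := by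
            simp

-- ===== VERDICT (by name: the statement is the Claim_ definition above) =====
theorem check_counts_spec : Claim_equal_check_counts := by
  intro pipes unique counts _
  show check_counts pipes unique counts = check_counts_alt pipes unique counts
  have hocc : ∀ p : String,
      (pipes.foldl (fun occ p => occ.insert p (occ.getD p 0 + 1)) PySem.Dict.empty).getD p 0
        = (PySem.List.count pipes p : Int) := by
    intro p
    rw [PySem.Dict.getD_foldl_insert_add_one]
    simp [PySem.List.count]
  have hcnt : pipes.foldl (fun count pipe =>
      (match (PySem.Dict.ofList (unique.zip counts)).get? pipe with
       | some c => if c ≠ 0 then count + c else count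
       | none => count)) 0
      = (PySem.Dict.ofList (unique.zip counts)).items.foldl
          (fun total kv => total + kv.2 *
            (pipes.foldl (fun occ p => occ.insert p (occ.getD p 0 + 1)) PySem.Dict.empty).getD kv.1 0) 0 := by
    rw [PySem.List.foldl_congr_mem _ _ _ _
      (fun acc x _ => step_getD (PySem.Dict.ofList (unique.zip counts)) acc x)]
    have hR : (PySem.Dict.ofList (unique.zip counts)).items.foldl
        (fun total kv => total + kv.2 *
          (pipes.foldl (fun occ p => occ.insert p (occ.getD p 0 + 1)) PySem.Dict.empty).getD kv.1 0) 0
      = (PySem.Dict.ofList (unique.zip counts)).items.foldl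
        (fun total kv => total + kv.2 * (PySem.List.count pipes kv.1 : Int)) 0 :=
      PySem.List.foldl_congr_mem _ _ _ _ (fun acc kv _ => by rw [hocc kv.1])
    rw [hR, PySem.List.foldl_add, PySem.List.foldl_add]
    have hnodup : ((PySem.Dict.ofList (unique.zip counts)).items.map Prod.fst).Nodup := by
      simpa [PySem.Dict.keys] using PySem.Dict.nodup_keys_ofList (unique.zip counts)
    simpa using exchange pipes (PySem.Dict.ofList (unique.zip counts)).items hnodup
  have hA : check_counts pipes unique counts =
      (if (PySem.Int.mod (pipes.foldl (fun count pipe =>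
        (match (PySem.Dict.ofList (unique.zip counts)).get? pipe with
         | some c => if c ≠ 0 then count + c else count
         | none => count)) 0) 2 == 1) = true then true else false) := rfl
  have hB : check_counts_alt pipes unique counts =
      (PySem.Int.mod ((PySem.Dict.ofList (unique.zip counts)).items.foldl
        (fun total kv => total + kv.2 *
          (pipes.foldl (fun occ p => occ.insert p (occ.getD p 0 + 1)) PySem.Dict.empty).getD kv.1 0) 0) 2 == 1) := rfl
  rw [hA, hB, hcnt]
  cases (PySem.Int.mod ((PySem.Dict.ofList (unique.zip counts)).items.foldl
        (fun total kv => total + kv.2 *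
          (pipes.foldl (fun occ p => occ.insert p (occ.getD p 0 + 1)) PySem.Dict.empty).getD kv.1 0) 0) 2 == 1) <;> simp
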